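-- pv_equiv track=rewrite | github.com/IndudharAdi/ai-resume-builder | src/agent.py | check_standard_sections
-- ===== SOURCE A (Python) =====
-- def check_standard_sections(resume_text: str) -> int:
--     """Check for presence and quality of standard resume sections. Returns score 0-15."""
--     score = 0
--     text_lower = resume_text.lower()
--     lines = resume_text.split('\n')
--
--     # Critical sections (must have at least 2 of these)
--     critical_sections = {
--         'experience': ['experience', 'work experience', 'employment', 'work history'],
--         'education': ['education', 'academic', 'degree'],
--         'skills': ['skills', 'technical skills', 'competencies']
--     }
--
--     critical_found = 0
--     for section_type, keywords in critical_sections.items():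
--         for keyword in keywords:
--             if keyword in text_lower:
--                 # Check if there's actual content after the section header
--                 for i, line in enumerate(lines):
--                     if keyword in line.lower() and i + 1 < len(lines):
--                         # Check next few lines have content (not just another header)
--                         has_content = any(len(lines[j].strip()) > 20 for j in range(i+1, min(i+4, len(lines))))
--                         if has_content:
--                             critical_found += 1
--                             score += 5
--                             break
--                 break
--
--     # Penalty if missing critical sections
--     if critical_found < 2:
--         score = max(0, score - 5)
--
--     return min(15, score)
-- ===== SOURCE B (Python) =====
-- def check_standard_sections(resume_text: str) -> int:
--     """Check for presence and quality of standard resume sections. Returns score 0-15."""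
--     text_lower = resume_text.lower()
--     lines = resume_text.split('\n')
--
--     sections = [
--         ['experience', 'work experience', 'employment', 'work history'],
--         ['education', 'academic', 'degree'],
--         ['skills', 'technical skills', 'competencies'],
--     ]
--     keywords = [kw for sec in sections for kw in sec]
--
--     # Single backward sweep: roll the "do the next three lines contain real
--     # content?" state along (no window slicing), and record per keyword whether
--     # it heads a line that is followed by content.
--     good = {kw: False for kw in keywords}
--     f1 = f2 = f3 = False        # content flag (len(strip) > 20) of the next 1/2/3 lines
--     exists_next = False
--     for line in reversed(lines):
--         if exists_next and (f1 or f2 or f3):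
--             low = line.lower()
--             good = {kw: v or kw in low for kw, v in good.items()}
--         f1, f2, f3 = len(line.strip()) > 20, f1, f2
--         exists_next = True
--
--     # A section scores iff its first keyword present in the whole text is good.
--     hits = 0
--     for sec in sections:
--         for kw in sec:
--             if kw in text_lower:
--                 hits += good[kw]
--                 break
--     return (0, 0, 10, 15)[hits]
-- ===== Notes on version B (the rewrite author's own statement) =====
-- stated objective: alternative
-- what changed: A loops per section keyword, rescanning all lines and re-slicing a 3-line lookahead window for each; B makes one backward sweep over the lines with a constant rolling content-flag state (no slicing, no rescans), building a keyword->good table as it goes, then scores sections by table lookup and maps the hit count through the fixed table (0,0,10,15) instead of threading a score/penalty/clamp chain.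
import Mathlib
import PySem

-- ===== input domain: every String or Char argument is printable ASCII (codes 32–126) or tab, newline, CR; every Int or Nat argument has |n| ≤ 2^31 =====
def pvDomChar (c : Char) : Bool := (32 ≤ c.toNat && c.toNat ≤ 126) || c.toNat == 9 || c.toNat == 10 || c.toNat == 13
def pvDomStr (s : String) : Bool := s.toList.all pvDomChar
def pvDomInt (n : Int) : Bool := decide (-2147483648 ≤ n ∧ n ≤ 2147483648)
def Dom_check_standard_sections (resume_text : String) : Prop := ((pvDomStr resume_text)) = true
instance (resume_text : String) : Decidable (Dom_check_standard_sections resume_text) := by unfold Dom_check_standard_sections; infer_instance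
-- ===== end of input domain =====

-- B replaces A's per-keyword rescans (and per-occurrence 3-line window slicing) by one
-- backward sweep with a constant rolling state building a keyword->good table, then
-- scores by table lookup; same return value, alternative decomposition.

-- shared one-line helper: len(line.strip()) > 20
def pvContentLine (l : String) : Bool := decide (20 < (PySem.Chars.strip l.toList).length)

-- ===== PORT A =====
-- A's inner loop over enumerate(lines): at position i, `i + 1 < len(lines)` is `rest ≠ []`
-- and the window lines[i+1 : min(i+4, len(lines))] is `rest.take 3`; break on first success.
def aScan (kw : String) : List String → Bool
  | [] => false
  | line :: rest =>
    if PySem.Str.isIn kw (PySem.Str.lower line) && !rest.isEmpty then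
      if (rest.take 3).any pvContentLine then true else aScan kw rest
    else aScan kw rest

def check_standard_sections (resume_text : String) : Int :=
  let text_lower := PySem.Str.lower resume_text
  let lines := (PySem.Str.split? resume_text "\n").getD []   -- split on a nonempty sep never raises
  let critical_sections : List (String × List String) :=
    [("experience", ["experience", "work experience", "employment", "work history"]),
     ("education", ["education", "academic", "degree"]),
     ("skills", ["skills", "technical skills", "competencies"])]
  -- per section: the first keyword present in text_lower (the `break`), then the line scan
  let st := critical_sections.foldl (fun (st : Int × Int) sec =>
      match sec.2.find? (fun kw => PySem.Str.isIn kw text_lower) with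
      | none => st
      | some kw => if aScan kw lines then (st.1 + 1, st.2 + 5) else st) ((0 : Int), (0 : Int))
  let score := if st.1 < 2 then max 0 (st.2 - 5) else st.2
  min 15 score

-- ===== PORT B =====
def bSections : List (List String) :=
  [["experience", "work experience", "employment", "work history"],
   ["education", "academic", "degree"],
   ["skills", "technical skills", "competencies"]]

def bKeywords : List String := bSections.flatten

-- state = (exists_next, f1, f2, f3, good); the dict comprehension rebuilds the dict over
-- its items in order with unique keys, which is exactly a map over the association list.
def bStep (st : Bool × Bool × Bool × Bool × List (String × Bool)) (line : String) :
    Bool × Bool × Bool × Bool × List (String × Bool) :=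
  let good :=
    if st.1 && (st.2.1 || st.2.2.1 || st.2.2.2.1) then
      let low := PySem.Str.lower line
      st.2.2.2.2.map (fun p => (p.1, p.2 || PySem.Str.isIn p.1 low))
    else st.2.2.2.2
  (true, pvContentLine line, st.2.1, st.2.2.1, good)

def check_standard_sections_alt (resume_text : String) : Int :=
  let text_lower := PySem.Str.lower resume_text
  let lines := (PySem.Str.split? resume_text "\n").getD []
  -- for line in reversed(lines): roll the 3-line content flags, update the good table
  let st := lines.reverse.foldl bStep
      (false, false, false, false, bKeywords.map (fun kw => (kw, false)))
  let good := st.2.2.2.2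
  -- hits += good[kw] for the first kw of each section present in the text (kw is always a key)
  let hits : Int := bSections.foldl (fun h sec =>
      match sec.find? (fun kw => PySem.Str.isIn kw text_lower) with
      | some kw => h + (if (PySem.Dict.mk good).getD kw false then 1 else 0)
      | none => h) 0
  -- (0, 0, 10, 15)[hits]: hits is 0..3, always in range
  (PySem.List.pyGet? [0, 0, 10, 15] hits).getD 0

-- ===== PRECONDITION & SPEC =====
def Spec_check_standard_sections (resume_text : String) (out : Int) : Prop := out = check_standard_sections_alt resume_text
instance (resume_text : String) (out : Int) : Decidable (Spec_check_standard_sections resume_text out) := by unfold Spec_check_standard_sections; infer_instance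

-- ===== CLAIM (what is proved, stated in full; the proofs are below) =====
def Claim_equal_check_standard_sections : Prop := ∀ (resume_text : String), Dom_check_standard_sections resume_text → Spec_check_standard_sections resume_text (check_standard_sections resume_text)

-- ===== LEMMAS AND PROOFS =====

-- A's lookahead condition at a position whose following lines are `rest`
def aFlag (rest : List String) : Bool := !(rest.take 3).isEmpty && (rest.take 3).any pvContentLine

-- "some line headed by kw (lowered) has content behind it", in B's or-order
def gk (kw : String) : List String → Bool
  | [] => false
  | l :: rest => gk kw rest || (aFlag rest && PySem.Str.isIn kw (PySem.Str.lower l))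

-- content flag of the first line, false for []
def hc (ls : List String) : Bool := (ls.head?.map pvContentLine).getD false

lemma aScan_eq_gk (kw : String) (lines : List String) : aScan kw lines = gk kw lines := by
  induction lines with
  | nil => rfl
  | cons l rest ih =>
    simp only [aScan, gk, aFlag] at *
    rw [ih]
    cases h : PySem.Str.isIn kw (PySem.Str.lower l) <;>
      cases hr : (rest.take 3).any pvContentLine <;>
      cases he : rest.isEmpty <;>
      simp_all [List.isEmpty_iff]

lemma aFlag_eq_hc (rest : List String) :
    aFlag rest = (!rest.isEmpty && (hc rest || hc rest.tail || hc rest.tail.tail)) := by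
  match rest with
  | [] => rfl
  | [a] => simp [aFlag, hc]
  | [a, b] => simp [aFlag, hc]
  | a :: b :: c :: t => simp [aFlag, hc, Bool.or_assoc]

-- invariant of B's backward sweep, phrased over foldr (= foldl over the reversed list)
lemma bInv (lines : List String) :
    lines.foldr (fun l st => bStep st l)
        (false, false, false, false, bKeywords.map (fun kw => (kw, false)))
      = (!lines.isEmpty, hc lines, hc lines.tail, hc lines.tail.tail,
         bKeywords.map (fun kw => (kw, gk kw lines))) := by
  induction lines with
  | nil => rfl
  | cons l rest ih =>
    rw [List.foldr_cons, ih]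
    simp only [bStep]
    rw [show (!rest.isEmpty && (hc rest || hc rest.tail || hc rest.tail.tail)) = aFlag rest
        from (aFlag_eq_hc rest).symm]
    cases hfl : aFlag rest <;> simp [gk, hc, hfl, List.map_map, Function.comp]

-- lookup in a table built by mapping over the keys
lemma getD_map_self (ks : List String) (f : String → Bool) (k : String) (hk : k ∈ ks) :
    (PySem.Dict.mk (ks.map (fun x => (x, f x)))).getD k false = f k := by
  induction ks with
  | nil => cases hk
  | cons a t ih =>
    simp only [List.map_cons, PySem.Dict.getD, PySem.Dict.get?_mk_cons]
    by_cases hak : a = k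
    · simp [hak]
    · have : k ∈ t := by
        rcases List.mem_cons.mp hk with h | h
        · exact absurd h.symm hak
        · exact h
      have := ih this
      simp only [PySem.Dict.getD] at this
      simp [beq_iff_eq, hak, this]

-- whether a section scores, via its first present keyword
def pvHit (tl : String) (lines : List String) (kws : List String) : Bool :=
  ((kws.find? (fun kw => PySem.Str.isIn kw tl)).map (fun kw => gk kw lines)).getD false

lemma stepA (tl : String) (lines : List String) (st : Int × Int) (kws : List String) :
    (match kws.find? (fun kw => PySem.Str.isIn kw tl) with
     | none => st
     | some kw => if aScan kw lines then (st.1 + 1, st.2 + 5) else st)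
    = if pvHit tl lines kws then (st.1 + 1, st.2 + 5) else st := by
  unfold pvHit
  cases kws.find? (fun kw => PySem.Str.isIn kw tl) <;> simp [aScan_eq_gk]

lemma stepB (tl : String) (lines : List String) (h : Int) (kws : List String)
    (hsub : ∀ k ∈ kws, k ∈ bKeywords) :
    (match kws.find? (fun kw => PySem.Str.isIn kw tl) with
     | some kw => h + (if (PySem.Dict.mk (bKeywords.map (fun kw => (kw, gk kw lines)))).getD kw false then 1 else 0)
     | none => h)
    = if pvHit tl lines kws then h + 1 else h := by
  unfold pvHit
  cases hf : kws.find? (fun kw => PySem.Str.isIn kw tl) with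
  | none => simp
  | some kw =>
    have hmem : kw ∈ bKeywords := hsub kw (List.mem_of_find?_eq_some hf)
    have hg := getD_map_self bKeywords (fun x => gk x lines) kw hmem
    cases hgk : gk kw lines <;> simp [hg, hgk]

-- ===== VERDICT (by name: the statement is the Claim_ definition above) =====
theorem check_standard_sections_spec : Claim_equal_check_standard_sections := by
  intro resume_text _
  unfold Spec_check_standard_sections check_standard_sections check_standard_sections_alt
  simp only [List.foldl_reverse, bInv, bSections, List.foldl_cons, List.foldl_nil, stepA]
  rw [stepB _ _ _ _ (by decide), stepB _ _ _ _ (by decide), stepB _ _ _ _ (by decide)]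
  cases pvHit (PySem.Str.lower resume_text) ((PySem.Str.split? resume_text "\n").getD [])
      ["experience", "work experience", "employment", "work history"] <;>
  cases pvHit (PySem.Str.lower resume_text) ((PySem.Str.split? resume_text "\n").getD [])
      ["education", "academic", "degree"] <;>
  cases pvHit (PySem.Str.lower resume_text) ((PySem.Str.split? resume_text "\n").getD [])
      ["skills", "technical skills", "competencies"] <;>
  simp [PySem.List.pyGet?, PySem.List.pyIdx?]
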